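-- pv_equiv track=rewrite | github.com/rogeriosilva-ifpi/ifpi-ads-2026.1-algoritmos | API_01_13Abril_2026_Turma_Normal/API2026/API2026_ViniciusLucena/q2_intervalo.py | calcular
-- ===== SOURCE A (Python) =====
-- def calcular(n, m):
--     numeros = ""
--     soma = 0
--
--     for i in range (n, m + 1):
--         if i % 2 !=0 and i % 3 == 0:
--             numeros += str (i) + " "
--             soma += i
--     return numeros, soma
-- ===== SOURCE B (Python) =====
-- def calcular(n, m):
--     # step directly over the numbers congruent to 3 mod 6; sum by arithmetic series
--     start = n + (3 - n) % 6
--     if start > m: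
--         return "", 0
--     k = (m - start) // 6 + 1
--     last = start + 6 * (k - 1)
--     numeros = ""
--     for i in range(start, m + 1, 6):
--         numeros += str(i) + " "
--     return numeros, k * (start + last) // 2
-- ===== Notes on version B (the rewrite author's own statement) =====
-- stated objective: alternative
-- what changed: B jumps directly over the numbers congruent to 3 mod 6 with a step-6 range starting at the first odd multiple of 3 >= n, and computes the sum with the arithmetic-series closed form instead of scanning and filtering every integer in [n, m].
import Mathlib
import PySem

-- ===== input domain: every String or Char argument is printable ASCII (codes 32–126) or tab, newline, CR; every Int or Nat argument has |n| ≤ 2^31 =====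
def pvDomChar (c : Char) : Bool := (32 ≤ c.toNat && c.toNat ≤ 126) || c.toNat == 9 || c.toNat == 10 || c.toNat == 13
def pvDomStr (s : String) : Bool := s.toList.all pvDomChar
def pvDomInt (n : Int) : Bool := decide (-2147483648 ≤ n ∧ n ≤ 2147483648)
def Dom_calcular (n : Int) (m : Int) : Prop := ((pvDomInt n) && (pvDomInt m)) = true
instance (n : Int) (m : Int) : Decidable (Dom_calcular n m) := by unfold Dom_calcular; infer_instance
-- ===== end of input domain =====

-- B replaces A's scan-and-filter of every integer in [n, m] by a step-6 walk over the
-- numbers ≡ 3 (mod 6) with a closed-form arithmetic-series sum (objective: alternative).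

-- ===== PORT A =====
-- loop body of A: if i % 2 != 0 and i % 3 == 0: numeros += str(i) + " "; soma += i
def calcAStep (acc : String × Int) (i : Int) : String × Int :=
  if PySem.Int.mod i 2 ≠ 0 ∧ PySem.Int.mod i 3 = 0 then
    (acc.1 ++ (PySem.Int.toStr i ++ " "), acc.2 + i)
  else acc

def calcular (n : Int) (m : Int) : String × Int :=
  (PySem.List.pyRange n (m + 1) 1).foldl calcAStep ("", 0)

-- ===== PORT B =====
-- loop body of B: numeros += str(i) + " "
def calcBStep (s : String) (i : Int) : String :=
  s ++ (PySem.Int.toStr i ++ " ")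

def calcular_alt (n : Int) (m : Int) : String × Int :=
  let start := n + PySem.Int.mod (3 - n) 6
  if start > m then ("", 0)
  else
    let k := PySem.Int.floordiv (m - start) 6 + 1
    let last := start + 6 * (k - 1)
    let numeros := (PySem.List.pyRange start (m + 1) 6).foldl calcBStep ""
    (numeros, PySem.Int.floordiv (k * (start + last)) 2)

-- ===== PRECONDITION & SPEC =====
def Spec_calcular (n : Int) (m : Int) (out : String × Int) : Prop := out = calcular_alt n m
instance (n : Int) (m : Int) (out : String × Int) : Decidable (Spec_calcular n m out) := by unfold Spec_calcular; infer_instance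

-- ===== CLAIM (what is proved, stated in full; the proofs are below) =====
def Claim_equal_calcular : Prop := ∀ (n : Int) (m : Int), Dom_calcular n m → Spec_calcular n m (calcular n m)

-- ===== LEMMAS AND PROOFS =====

-- the accumulated string/sum are a prefix: peel the initial state out of A's fold
theorem foldA_prefix (l : List Int) (s : String) (t : Int) :
    l.foldl calcAStep (s, t) =
      (s ++ (l.foldl calcAStep ("", 0)).1, t + (l.foldl calcAStep ("", 0)).2) := by
  induction l generalizing s t with
  | nil => simp
  | cons i l ih =>
    simp only [List.foldl_cons]
    rw [ih (calcAStep (s, t) i).1 (calcAStep (s, t) i).2,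
        ih (calcAStep ("", 0) i).1 (calcAStep ("", 0) i).2]
    unfold calcAStep
    split_ifs <;> (simp [String.append_assoc]; try ring)

-- same for B's string fold
theorem foldB_prefix (l : List Int) (s : String) :
    l.foldl calcBStep s = s ++ l.foldl calcBStep "" := by
  induction l generalizing s with
  | nil => simp
  | cons i l ih =>
    simp only [List.foldl_cons]
    rw [ih (calcBStep s i), ih (calcBStep "" i)]
    simp [calcBStep, String.append_assoc]

-- step-6 range: empty and cons forms
theorem pyRange6_nil (a b : Int) (h : b ≤ a) : PySem.List.pyRange a b 6 = [] := by
  rw [PySem.List.pyRange_of_pos a b (by norm_num)]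
  simp [show ¬ a < b by omega]

theorem pyRange6_cons (a b : Int) (h : a < b) :
    PySem.List.pyRange a b 6 = a :: PySem.List.pyRange (a + 6) b 6 := by
  rw [PySem.List.pyRange_of_pos a b (by norm_num),
      PySem.List.pyRange_of_pos (a + 6) b (by norm_num)]
  by_cases h6 : a + 6 < b
  · have hc : ((b - a + 6 - 1) / 6).toNat = ((b - (a + 6) + 6 - 1) / 6).toNat + 1 := by omega
    simp only [if_pos h, if_pos h6, hc, List.range_succ_eq_map, List.map_cons, List.map_map]
    congr 1
    · norm_num
    · exact List.map_congr_left fun k _ => by simp only [Function.comp_apply]; push_cast; ring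
  · have hc : ((b - a + 6 - 1) / 6).toNat = 1 := by omega
    simp [if_pos h, h6, hc, List.range_succ]

-- B's result peels its first element when n itself is an odd multiple of 3
theorem altB_cons_hit (n m : Int) (hn : n ≤ m) (h3 : n % 6 = 3) :
    calcular_alt n m =
      ((PySem.Int.toStr n ++ " ") ++ (calcular_alt (n + 1) m).1,
       n + (calcular_alt (n + 1) m).2) := by
  simp only [calcular_alt, PySem.Int.mod_eq_emod_of_pos (by norm_num : (0:Int) < 6),
    PySem.Int.floordiv_eq_ediv_of_pos (by norm_num : (0:Int) < 6),
    PySem.Int.floordiv_eq_ediv_of_pos (by norm_num : (0:Int) < 2)]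
  have hs : n + (3 - n) % 6 = n := by omega
  have hs' : (n + 1) + (3 - (n + 1)) % 6 = n + 6 := by omega
  rw [hs, hs']
  simp only [if_neg (by omega : ¬ n > m)]
  by_cases h6 : n + 6 > m
  · -- n is the only term
    have hk : (m - n) / 6 = 0 := by omega
    simp only [if_pos h6]
    rw [pyRange6_cons n (m + 1) (by omega), pyRange6_nil (n + 6) (m + 1) (by omega)]
    simp [calcBStep, hk]
    omega
  · -- at least one more term: k = k' + 1
    simp only [if_neg h6]
    rw [pyRange6_cons n (m + 1) (by omega)]
    simp only [List.foldl_cons]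
    rw [foldB_prefix _ (calcBStep "" n)]
    congr 1
    -- arithmetic-series sum: divide out the exact /2 and compare polynomials
    have hK : (m - n) / 6 = (m - (n + 6)) / 6 + 1 := by omega
    set K : Int := (m - (n + 6)) / 6 with hKdef
    rw [hK]
    rw [(by ring : (K + 1 + 1) * (n + (n + 6 * (K + 1 + 1 - 1))) = 2 * ((K + 2) * n + 3 * (K + 1) * (K + 2))),
        (by ring : (K + 1) * (n + 6 + (n + 6 + 6 * (K + 1 - 1))) = 2 * ((K + 1) * (n + 6) + 3 * K * (K + 1))),
        Int.mul_ediv_cancel_left _ (by norm_num), Int.mul_ediv_cancel_left _ (by norm_num)]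
    ring

-- when n is not an odd multiple of 3 it contributes nothing and start is unchanged
theorem altB_skip (n m : Int) (h3 : n % 6 ≠ 3) :
    calcular_alt n m = calcular_alt (n + 1) m := by
  simp only [calcular_alt, PySem.Int.mod_eq_emod_of_pos (by norm_num : (0:Int) < 6)]
  have : n + (3 - n) % 6 = (n + 1) + (3 - (n + 1)) % 6 := by omega
  rw [this]

-- the filter condition of A is exactly n ≡ 3 (mod 6)
theorem cond_iff (i : Int) :
    (PySem.Int.mod i 2 ≠ 0 ∧ PySem.Int.mod i 3 = 0) ↔ i % 6 = 3 := by
  rw [PySem.Int.mod_eq_emod_of_pos (by norm_num : (0:Int) < 2),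
      PySem.Int.mod_eq_emod_of_pos (by norm_num : (0:Int) < 3)]
  omega

theorem main_eq (N : Nat) : ∀ (n m : Int), (m + 1 - n).toNat = N → calcular n m = calcular_alt n m := by
  induction N with
  | zero =>
    intro n m h
    simp only [calcular, calcular_alt, PySem.Int.mod_eq_emod_of_pos (by norm_num : (0:Int) < 6)]
    rw [PySem.List.pyRange_one_eq_nil (by omega)]
    rw [if_pos (by omega : n + (3 - n) % 6 > m)]
    simp
  | succ N ih =>
    intro n m h
    have hnm : n ≤ m := by omega
    have hA : calcular n m =
        ((calcAStep ("", 0) n).1 ++ (calcular (n + 1) m).1,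
         (calcAStep ("", 0) n).2 + (calcular (n + 1) m).2) := by
      unfold calcular
      rw [PySem.List.pyRange_one_cons (by omega : n < m + 1)]
      simp only [List.foldl_cons]
      rw [foldA_prefix _ (calcAStep ("", 0) n).1 (calcAStep ("", 0) n).2]
    rw [hA, ih (n + 1) m (by omega)]
    by_cases h3 : n % 6 = 3
    · rw [altB_cons_hit n m hnm h3]
      have : calcAStep ("", 0) n = ("" ++ (PySem.Int.toStr n ++ " "), 0 + n) := by
        unfold calcAStep
        rw [if_pos ((cond_iff n).mpr h3)]
      rw [this]; simp
    · rw [altB_skip n m h3]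
      have : calcAStep ("", 0) n = ("", 0) := by
        unfold calcAStep
        rw [if_neg (fun hc => h3 ((cond_iff n).mp hc))]
      rw [this]; simp

-- ===== VERDICT (by name: the statement is the Claim_ definition above) =====
theorem calcular_spec : Claim_equal_calcular := by
  intro n m _
  unfold Spec_calcular
  exact main_eq (m + 1 - n).toNat n m rfl
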